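-- pv_equiv track=rewrite | github.com/Dors-Coding-School/Ebooks | CS50 Python/Ebook 2/Part 1/problem28.py | get_sum_digits
-- ===== SOURCE A (Python) =====
-- def get_sum_digits(x):
--     sum = 0
--     isAlternateDigit = False
--     while(x != 0):
--         if isAlternateDigit:
--             sum += x % 10
--         isAlternateDigit = not isAlternateDigit
--         x //= 10
--     return sum
-- ===== SOURCE B (Python) =====
-- def _digits(x):
--     # least-significant-first decimal digit list of x (x >= 0)
--     return [] if x == 0 else [x % 10] + _digits(x // 10)
--
--
-- def get_sum_digits(x):
--     return sum(d for i, d in enumerate(_digits(x)) if i % 2 == 1)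
-- ===== Notes on version B (the rewrite author's own statement) =====
-- stated objective: alternative
-- what changed: Replaces the while-loop with a toggled boolean flag by recursively building the least-significant-first digit list and summing the digits at odd enumerate indices.
import Mathlib
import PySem

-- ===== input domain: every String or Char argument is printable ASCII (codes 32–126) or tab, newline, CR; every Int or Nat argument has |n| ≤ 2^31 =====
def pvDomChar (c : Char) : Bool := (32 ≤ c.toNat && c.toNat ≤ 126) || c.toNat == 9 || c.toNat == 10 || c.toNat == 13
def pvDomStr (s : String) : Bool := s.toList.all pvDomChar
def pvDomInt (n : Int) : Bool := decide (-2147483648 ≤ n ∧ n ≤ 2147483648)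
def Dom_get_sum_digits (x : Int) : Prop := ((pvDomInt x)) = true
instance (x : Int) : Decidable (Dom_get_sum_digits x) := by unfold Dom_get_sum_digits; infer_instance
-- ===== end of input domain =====

-- B replaces A's flag-toggling while loop by building the digit list recursively and
-- summing the digits at odd enumerate indices (alternative decomposition, same cost).


-- ===== PORT A =====
-- while(x != 0): … ; the guard is written 'x ≤ 0' to make the function total: for x > 0 it
-- agrees with 'x ≠ 0', and for x < 0 the Python loop never terminates (there nothing is claimed: Python returns no value).
def getSumLoop (sum : Int) (isAlternateDigit : Bool) (x : Int) : Int :=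
  if _h : x ≤ 0 then sum
  else getSumLoop (if isAlternateDigit then sum + PySem.Int.mod x 10 else sum)
        (!isAlternateDigit) (PySem.Int.floordiv x 10)
  termination_by x.toNat
  decreasing_by simp only [PySem.Int.floordiv, Int.fdiv_eq_ediv]; omega

def get_sum_digits (x : Int) : Int := getSumLoop 0 false x

-- ===== PORT B =====
-- _digits: '[] if x == 0 else [x % 10] + _digits(x // 10)'; the guard is 'x ≤ 0' to make the
-- recursion total: for x > 0 it agrees with 'x == 0', and for x < 0 the Python recursion
-- never terminates (there nothing is claimed: Python returns no value).
def digitsOf (x : Int) : List Int :=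
  if _h : x ≤ 0 then []
  else PySem.Int.mod x 10 :: digitsOf (PySem.Int.floordiv x 10)
  termination_by x.toNat
  decreasing_by simp only [PySem.Int.floordiv, Int.fdiv_eq_ediv]; omega

def get_sum_digits_alt (x : Int) : Int :=
  (PySem.List.enumerate (digitsOf x)).foldl
    (fun s p => if p.1 % 2 == 1 then s + p.2 else s) 0

-- ===== PRECONDITION & SPEC =====
def Spec_get_sum_digits (x : Int) (out : Int) : Prop := out = get_sum_digits_alt x
instance (x : Int) (out : Int) : Decidable (Spec_get_sum_digits x out) := by unfold Spec_get_sum_digits; infer_instance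

-- ===== CLAIM (what is proved, stated in full; the proofs are below) =====
def Claim_equal_get_sum_digits : Prop := ∀ (x : Int), Dom_get_sum_digits x → Spec_get_sum_digits x (get_sum_digits x)

-- ===== LEMMAS AND PROOFS =====

-- alternating sum: add the head iff the flag is true, toggling along the list
def altSum (b : Bool) : List Int → Int
  | [] => 0
  | d :: ds => (if b then d else 0) + altSum (!b) ds

theorem getSumLoop_eq_altSum (x : Int) : ∀ (s : Int) (f : Bool),
    getSumLoop s f x = s + altSum f (digitsOf x) := by
  induction h : x.toNat using Nat.strong_induction_on generalizing x with
  | _ n ih =>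
    intro s f
    rw [getSumLoop, digitsOf]
    by_cases hx : x ≤ 0
    · simp [hx, altSum]
    · simp only [hx, dite_false, altSum]
      rw [ih ((PySem.Int.floordiv x 10).toNat)
            (by simp only [PySem.Int.floordiv, Int.fdiv_eq_ediv]; omega) _ rfl]
      cases f <;> simp <;> ring

theorem foldl_enumerate_eq_altSum (ds : List Int) : ∀ (k s : Int), 0 ≤ k →
    (PySem.List.enumerate ds k).foldl (fun s p => if p.1 % 2 == 1 then s + p.2 else s) s
      = s + altSum (k % 2 == 1) ds := by
  induction ds with
  | nil => intro k s _; simp [PySem.List.enumerate_nil, altSum]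
  | cons d ds ih =>
    intro k s hk
    rw [PySem.List.enumerate_cons]
    simp only [List.foldl_cons]
    rw [ih (k + 1) _ (by omega)]
    have h2 : k % 2 = 0 ∨ k % 2 = 1 := Int.emod_two_eq k
    have h3 : (k + 1) % 2 = 0 ∨ (k + 1) % 2 = 1 := Int.emod_two_eq (k + 1)
    rcases h2 with h2 | h2 <;> rcases h3 with h3 | h3 <;>
      simp [altSum, h2, h3] <;> omega

-- ===== VERDICT (by name: the statement is the Claim_ definition above) =====
theorem get_sum_digits_spec : Claim_equal_get_sum_digits := by
  intro x _
  unfold Spec_get_sum_digits get_sum_digits get_sum_digits_alt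
  rw [getSumLoop_eq_altSum, foldl_enumerate_eq_altSum _ 0 0 le_rfl]
  have h0 : ((0 : Int) % 2 == 1) = false := by decide
  rw [h0]
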